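-- pv_equiv track=rewrite | github.com/learnwithparam/monkey-kata | api/demos/legal_contract_analyzer/legal_agentic_rag.py | _parse_compliance_response
-- ===== SOURCE A (Python) =====
-- from typing import Dict, List, Any, Optional, TypedDict
--
-- def _parse_compliance_response(response: str) -> List[Dict[str, Any]]:
--     """Parse compliance response"""
--     issues = []
--     lines = response.split('\n')
--
--     current_issue = {}
--     for line in lines:
--         line = line.strip()
--         if line.startswith('ISSUE_TYPE:'):
--             if current_issue:
--                 issues.append(current_issue)
--             current_issue = {'issue_type': line.split(':', 1)[1].strip()}
--         elif line.startswith('DESCRIPTION:'):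
--             current_issue['description'] = line.split(':', 1)[1].strip()
--         elif line.startswith('SEVERITY:'):
--             current_issue['severity'] = line.split(':', 1)[1].strip().lower()
--         elif line.startswith('RECOMMENDATION:'):
--             current_issue['recommendation'] = line.split(':', 1)[1].strip()
--
--     if current_issue:
--         issues.append(current_issue)
--
--     return issues
-- ===== SOURCE B (Python) =====
-- def _parse_compliance_response(response):
--     """Two-phase parse: strip lines, partition into ISSUE_TYPE-delimited blocks, then fill a dict per block."""
--     lines = [raw.strip() for raw in response.split('\n')]
--     blocks = []
--     current = []
--     for line in lines:
--         if line.startswith('ISSUE_TYPE:'):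
--             blocks.append(current)
--             current = [line]
--         else:
--             current.append(line)
--     blocks.append(current)
--
--     issues = []
--     for block in blocks:
--         issue = {}
--         for line in block:
--             if line.startswith('ISSUE_TYPE:'):
--                 issue['issue_type'] = line.split(':', 1)[1].strip()
--             elif line.startswith('DESCRIPTION:'):
--                 issue['description'] = line.split(':', 1)[1].strip()
--             elif line.startswith('SEVERITY:'):
--                 issue['severity'] = line.split(':', 1)[1].strip().lower()
--             elif line.startswith('RECOMMENDATION:'):
--                 issue['recommendation'] = line.split(':', 1)[1].strip()
--         if issue:
--             issues.append(issue)
--     return issues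
-- ===== Notes on version B (the rewrite author's own statement) =====
-- stated objective: alternative
-- what changed: Replaces A's single stateful scan (running dict flushed at each marker) by two phases: strip and partition the lines into ISSUE_TYPE-delimited blocks, then map each block to a dict and keep the non-empty ones.
import Mathlib
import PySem

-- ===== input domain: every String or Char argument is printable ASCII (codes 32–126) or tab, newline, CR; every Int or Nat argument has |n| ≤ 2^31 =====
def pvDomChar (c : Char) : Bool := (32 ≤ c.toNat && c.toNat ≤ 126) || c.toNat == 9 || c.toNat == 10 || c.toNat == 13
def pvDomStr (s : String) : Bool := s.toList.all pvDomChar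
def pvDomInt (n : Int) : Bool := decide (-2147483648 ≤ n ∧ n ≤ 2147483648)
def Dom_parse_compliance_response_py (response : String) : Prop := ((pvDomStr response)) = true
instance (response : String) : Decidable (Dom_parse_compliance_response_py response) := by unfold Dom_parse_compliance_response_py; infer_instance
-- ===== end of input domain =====

-- B parses in two phases (partition into ISSUE_TYPE-delimited blocks, then fill one dict per block)
-- instead of A's single stateful scan; same return value, no speed claim.

-- ===== PORT A =====
-- line.split(':', 1)[1].strip(); exact whenever the line contains ':' (always the case on the
-- lines it is applied to, which start with a prefix containing ':')
def pcrA_field (line : String) : String :=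
  PySem.Str.strip (((PySem.Str.splitMax? line ":" 1).getD []).getD 1 "")

def pcrA_loop : List String → List (PySem.Dict String String) → PySem.Dict String String →
    List (PySem.Dict String String)
  | [], issues, cur => if cur.items.isEmpty then issues else issues ++ [cur]
  | l :: rest, issues, cur =>
    let line := PySem.Str.strip l
    if PySem.Str.startswith line "ISSUE_TYPE:" then
      pcrA_loop rest (if cur.items.isEmpty then issues else issues ++ [cur])
        (PySem.Dict.empty.insert "issue_type" (pcrA_field line))
    else if PySem.Str.startswith line "DESCRIPTION:" then
      pcrA_loop rest issues (cur.insert "description" (pcrA_field line))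
    else if PySem.Str.startswith line "SEVERITY:" then
      pcrA_loop rest issues (cur.insert "severity" (PySem.Str.lower (pcrA_field line)))
    else if PySem.Str.startswith line "RECOMMENDATION:" then
      pcrA_loop rest issues (cur.insert "recommendation" (pcrA_field line))
    else
      pcrA_loop rest issues cur

def parse_compliance_response_py (response : String) : List (List (String × String)) :=
  (pcrA_loop ((PySem.Str.split? response "\n").getD []) [] PySem.Dict.empty).map (·.items)

-- ===== PORT B =====
def pcrB_field (line : String) : String :=
  PySem.Str.strip (((PySem.Str.splitMax? line ":" 1).getD []).getD 1 "")

-- phase 1 step: a marker line closes the current block and opens a new one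
def pcrB_pstep (st : List (List String) × List String) (line : String) :
    List (List String) × List String :=
  if PySem.Str.startswith line "ISSUE_TYPE:" then (st.1 ++ [st.2], [line])
  else (st.1, st.2 ++ [line])

-- phase 2 step: set one field of the block's dict (last-wins by Dict.insert)
def pcrB_fillstep (d : PySem.Dict String String) (line : String) : PySem.Dict String String :=
  if PySem.Str.startswith line "ISSUE_TYPE:" then d.insert "issue_type" (pcrB_field line)
  else if PySem.Str.startswith line "DESCRIPTION:" then d.insert "description" (pcrB_field line)
  else if PySem.Str.startswith line "SEVERITY:" then
    d.insert "severity" (PySem.Str.lower (pcrB_field line))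
  else if PySem.Str.startswith line "RECOMMENDATION:" then
    d.insert "recommendation" (pcrB_field line)
  else d

def pcrB_fill (block : List String) : PySem.Dict String String :=
  block.foldl pcrB_fillstep PySem.Dict.empty

def parse_compliance_response_py_alt (response : String) : List (List (String × String)) :=
  let lines := ((PySem.Str.split? response "\n").getD []).map PySem.Str.strip
  let st := lines.foldl pcrB_pstep ([], [])
  let blocks := st.1 ++ [st.2]
  (((blocks.map pcrB_fill).filter (fun d => !d.items.isEmpty)).map (·.items))

-- ===== PRECONDITION & SPEC =====
def Spec_parse_compliance_response_py (response : String) (out : List (List (String × String))) : Prop := out = parse_compliance_response_py_alt response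
instance (response : String) (out : List (List (String × String))) : Decidable (Spec_parse_compliance_response_py response out) := by unfold Spec_parse_compliance_response_py; infer_instance

-- ===== CLAIM (what is proved, stated in full; the proofs are below) =====
def Claim_equal_parse_compliance_response_py : Prop := ∀ (response : String), Dom_parse_compliance_response_py response → Spec_parse_compliance_response_py response (parse_compliance_response_py response)

-- ===== LEMMAS AND PROOFS =====

-- recursive characterisation of B's partition phase (proof-side only)
def pcrSplit : List String → List String × List (List String)
  | [] => ([], [])
  | l :: t =>
    let p := pcrSplit t
    if PySem.Str.startswith l "ISSUE_TYPE:" then ([], (l :: p.1) :: p.2) else (l :: p.1, p.2)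

def pcrFillFrom (d : PySem.Dict String String) (block : List String) : PySem.Dict String String :=
  block.foldl pcrB_fillstep d

theorem pcrB_part_acc (ls : List String) (done : List (List String)) (cur : List String) :
    ls.foldl pcrB_pstep (done, cur) =
      (done ++ (ls.foldl pcrB_pstep ([], cur)).1, (ls.foldl pcrB_pstep ([], cur)).2) := by
  induction ls generalizing done cur with
  | nil => simp
  | cons l t ih =>
    simp only [List.foldl_cons, pcrB_pstep]
    by_cases h : PySem.Str.startswith l "ISSUE_TYPE:" = true
    · rw [if_pos h, if_pos h]
      rw [ih (done ++ [cur]) [l], ih ([] ++ [cur]) [l]]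
      simp
    · rw [if_neg h, if_neg h]
      rw [ih done (cur ++ [l]), ih [] (cur ++ [l])]

theorem pcrB_part_split (ls : List String) (cur : List String) :
    (ls.foldl pcrB_pstep ([], cur)).1 ++ [(ls.foldl pcrB_pstep ([], cur)).2] =
      (cur ++ (pcrSplit ls).1) :: (pcrSplit ls).2 := by
  induction ls generalizing cur with
  | nil => simp [pcrSplit]
  | cons l t ih =>
    simp only [List.foldl_cons, pcrB_pstep, pcrSplit]
    by_cases h : PySem.Str.startswith l "ISSUE_TYPE:" = true
    · rw [if_pos h, if_pos h]
      rw [pcrB_part_acc t ([] ++ [cur]) [l]]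
      have h2 := ih [l]
      simp only [List.nil_append, List.cons_append] at h2 ⊢
      rw [h2]
      simp
    · rw [if_neg h, if_neg h]
      have h2 := ih (cur ++ [l])
      simp only [List.append_assoc, List.cons_append, List.nil_append] at h2 ⊢
      exact h2

theorem pcr_main (ls : List String) (issues : List (PySem.Dict String String))
    (cur : PySem.Dict String String) :
    pcrA_loop ls issues cur =
      issues ++
        ((pcrFillFrom cur (pcrSplit (ls.map PySem.Str.strip)).1 ::
            ((pcrSplit (ls.map PySem.Str.strip)).2).map pcrB_fill).filter
          (fun d => !d.items.isEmpty)) := by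
  induction ls generalizing issues cur with
  | nil =>
    simp only [pcrA_loop, List.map_nil, pcrSplit, pcrFillFrom, List.foldl_nil, List.filter]
    by_cases h : cur.items.isEmpty
    · simp [h]
    · simp [h]
  | cons l t ih =>
    simp only [pcrA_loop, List.map_cons, pcrSplit]
    by_cases h : PySem.Str.startswith (PySem.Str.strip l) "ISSUE_TYPE:" = true
    · rw [if_pos h, if_pos h, ih]
      simp only [List.map_cons, pcrB_fill, pcrFillFrom, List.foldl_cons, List.foldl_nil,
        pcrB_fillstep, pcrB_field, pcrA_field]
      rw [if_pos h, List.filter_cons]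
      by_cases hc : cur.items.isEmpty
      · simp [hc, List.filter_cons]
      · simp [hc, List.filter_cons]
    · rw [if_neg h, if_neg h]
      by_cases h2 : PySem.Str.startswith (PySem.Str.strip l) "DESCRIPTION:" = true
      · rw [if_pos h2, ih]
        simp only [pcrFillFrom, List.foldl_cons, pcrB_fillstep, pcrB_field, pcrA_field]
        rw [if_neg h, if_pos h2]
      · rw [if_neg h2]
        by_cases h3 : PySem.Str.startswith (PySem.Str.strip l) "SEVERITY:" = true
        · rw [if_pos h3, ih]
          simp only [pcrFillFrom, List.foldl_cons, pcrB_fillstep, pcrB_field, pcrA_field]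
          rw [if_neg h, if_neg h2, if_pos h3]
        · rw [if_neg h3]
          by_cases h4 : PySem.Str.startswith (PySem.Str.strip l) "RECOMMENDATION:" = true
          · rw [if_pos h4, ih]
            simp only [pcrFillFrom, List.foldl_cons, pcrB_fillstep, pcrB_field, pcrA_field]
            rw [if_neg h, if_neg h2, if_neg h3, if_pos h4]
          · rw [if_neg h4, ih]
            simp only [pcrFillFrom, List.foldl_cons, pcrB_fillstep]
            rw [if_neg h, if_neg h2, if_neg h3, if_neg h4]

-- ===== VERDICT (by name: the statement is the Claim_ definition above) =====
theorem parse_compliance_response_py_spec : Claim_equal_parse_compliance_response_py := by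
  intro response _
  unfold Spec_parse_compliance_response_py parse_compliance_response_py
    parse_compliance_response_py_alt
  rw [pcr_main]
  have hs := pcrB_part_split (List.map PySem.Str.strip ((PySem.Str.split? response "\n").getD [])) []
  simp only [List.nil_append] at hs
  simp [pcrB_fill, pcrFillFrom, hs]
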